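-- pv_equiv track=rewrite | github.com/EggHeadTimothy/python_edabit_exercises | prison_break.py | freed_prisoners
-- ===== SOURCE A (Python) =====
-- def switch_locks(prison):
--     new_prison = []
--     for cell in prison:
--         if cell == 0:
--             new_prison.append(1)
--         elif cell == 1:
--             new_prison.append(0)
--     return new_prison
--
-- def freed_prisoners(prison):
--     """
--     Assuming the first cell isn't locked, we check each cell to see if it's a 0 or 1. If it's a 1, we increment the
--     accumulator tracking the number of prisoners freed, and use our helper function to switch the locks. At the end, we
--     return the accumulator.
--     """
--     if prison[0] == 0:
--         return 0
--
--     freed = 0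
--
--     for i in range(len(prison)):
--         cell = prison[i]
--         if cell == 1:
--             freed += 1
--             prison = switch_locks(prison)
--         elif cell == 0:
--             pass
--
--     return freed
-- ===== SOURCE B (Python) =====
-- def freed_prisoners(prison):
--     # Single pass: instead of rebuilding the whole list on every toggle,
--     # track which value a cell must show to be "open" now (alternates 1,0,1,...).
--     if prison[0] == 0:
--         return 0
--     freed = 0
--     want = 1
--     for cell in prison:
--         if cell == want:
--             freed += 1
--             want = 1 - want
--     return freed
-- ===== Notes on version B (the rewrite author's own statement) =====
-- stated objective: faster
-- what changed: B replaces A's rebuild-the-whole-list-on-every-toggle (switch_locks copy per freed prisoner) with a single pass that tracks the value an open cell must currently show (alternating 1,0,1,...).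
import Mathlib
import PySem

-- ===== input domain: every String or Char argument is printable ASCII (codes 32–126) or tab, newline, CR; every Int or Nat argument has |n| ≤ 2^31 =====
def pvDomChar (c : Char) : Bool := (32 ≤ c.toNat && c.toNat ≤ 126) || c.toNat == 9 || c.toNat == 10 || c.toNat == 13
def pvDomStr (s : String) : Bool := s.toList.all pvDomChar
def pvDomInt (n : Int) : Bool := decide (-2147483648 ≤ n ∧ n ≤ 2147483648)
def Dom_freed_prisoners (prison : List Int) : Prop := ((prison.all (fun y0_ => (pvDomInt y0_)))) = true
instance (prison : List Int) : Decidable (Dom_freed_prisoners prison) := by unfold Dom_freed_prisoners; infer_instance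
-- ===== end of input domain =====

-- B replaces A's quadratic rebuild-the-list-on-every-toggle loop by a single pass that
-- tracks the value an open cell must currently show (objective: faster, asymptotic).

-- ===== PORT A =====
-- helper switch_locks: rebuilds the list, flipping 0/1 and dropping any other value
def switch_locks (prison : List Int) : List Int :=
  prison.foldl (fun acc cell =>
    if cell = 0 then acc ++ [1] else if cell = 1 then acc ++ [0] else acc) []

-- the 'for i in range(len(prison))' loop: fuel = remaining iterations, i = current index;
-- on IndexError (pyGet? = none, only outside Pre_) the recursion stops
def fpGo : Nat → Nat → List Int → Int → Int
  | 0, _, _, freed => freed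
  | fuel + 1, i, p, freed =>
    match PySem.List.pyGet? p (Int.ofNat i) with
    | none => freed
    | some cell =>
      if cell = 1 then fpGo fuel (i + 1) (switch_locks p) (freed + 1)
      else fpGo fuel (i + 1) p freed

def freed_prisoners (prison : List Int) : Int :=
  match PySem.List.pyGet? prison 0 with
  | none => 0   -- IndexError in Python; excluded by Pre_
  | some v => if v = 0 then 0 else fpGo prison.length 0 prison 0

-- ===== PORT B =====
-- one pass; want = value an open cell currently shows (alternates 1,0,1,…)
def fpAltGo : List Int → Int → Int → Int
  | [], freed, _ => freed
  | cell :: rest, freed, want =>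
    if cell = want then fpAltGo rest (freed + 1) (1 - want)
    else fpAltGo rest freed want

def freed_prisoners_alt (prison : List Int) : Int :=
  match PySem.List.pyGet? prison 0 with
  | none => 0   -- IndexError in Python; excluded by Pre_
  | some v => if v = 0 then 0 else fpAltGo prison 0 1

-- ===== PRECONDITION & SPEC =====
-- Pre_ excludes exactly the inputs where A raises: the empty list (IndexError on prison[0]),
-- and lists whose first cell is nonzero, containing a non-binary value and a 1 before the last
-- position — there the first toggle shrinks the list (switch_locks drops non-binary cells) and a
-- later prison[i] raises IndexError.
def Pre_freed_prisoners (prison : List Int) : Prop :=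
  prison ≠ [] ∧
    (prison.head? = some 0 ∨ (∀ x ∈ prison, x = 0 ∨ x = 1) ∨ (1 : Int) ∉ prison.dropLast)
instance (prison : List Int) : Decidable (Pre_freed_prisoners prison) := by
  unfold Pre_freed_prisoners; infer_instance
def pvWitness_freed_prisoners : List Int := [1, 0, 1, 1, 0]

def Spec_freed_prisoners (prison : List Int) (out : Int) : Prop := out = freed_prisoners_alt prison
instance (prison : List Int) (out : Int) : Decidable (Spec_freed_prisoners prison out) := by unfold Spec_freed_prisoners; infer_instance

-- ===== CLAIM (what is proved, stated in full; the proofs are below) =====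
def Claim_equal_freed_prisoners : Prop := ∀ (prison : List Int), Dom_freed_prisoners prison → Pre_freed_prisoners prison → Spec_freed_prisoners prison (freed_prisoners prison)

-- ===== LEMMAS AND PROOFS =====

lemma switch_foldl (p acc : List Int) :
    p.foldl (fun acc cell =>
      if cell = 0 then acc ++ [1] else if cell = 1 then acc ++ [0] else acc) acc
      = acc ++ p.foldl (fun acc cell =>
      if cell = 0 then acc ++ [1] else if cell = 1 then acc ++ [0] else acc) [] := by
  induction p generalizing acc with
  | nil => simp
  | cons c t ih =>
    simp only [List.foldl_cons]
    rw [ih, ih (if c = 0 then [] ++ [1] else if c = 1 then [] ++ [0] else [])]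
    split_ifs <;> simp

lemma switch_locks_binary (p : List Int) (hb : ∀ x ∈ p, x = 0 ∨ x = 1) :
    switch_locks p = p.map (fun c => 1 - c) := by
  induction p with
  | nil => rfl
  | cons c t ih =>
    have hc := hb c (by simp)
    have ht : ∀ x ∈ t, x = 0 ∨ x = 1 := fun x hx => hb x (by simp [hx])
    unfold switch_locks at *
    simp only [List.foldl_cons, List.map_cons]
    rw [switch_foldl]
    rcases hc with h | h <;> simp [h, ih ht]

lemma main_binary (rest : List Int) : ∀ (pre : List Int) (freed want : Int) (q : List Int),
    (∀ x ∈ pre ++ rest, x = 0 ∨ x = 1) →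
    ((want = 1 ∧ q = pre ++ rest) ∨ (want = 0 ∧ q = (pre ++ rest).map (fun c => 1 - c))) →
    fpGo rest.length pre.length q freed = fpAltGo rest freed want := by
  induction rest with
  | nil => intro pre freed want q _ _; simp [fpGo, fpAltGo]
  | cons cell rs ih =>
    intro pre freed want q hb hq
    have hcell : cell = 0 ∨ cell = 1 := hb cell (by simp)
    have hb' : ∀ x ∈ (pre ++ [cell]) ++ rs, x = 0 ∨ x = 1 := by
      intro x hx; exact hb x (by simpa using hx)
    have hget : PySem.List.pyGet? q (Int.ofNat pre.length)
        = some (if want = 1 then cell else 1 - cell) := by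
      rcases hq with ⟨hw, hqe⟩ | ⟨hw, hqe⟩
      · subst hqe; simp [hw]
      · subst hqe
        have : (pre ++ cell :: rs).map (fun c => 1 - c)
            = pre.map (fun c => 1 - c) ++ (1 - cell) :: rs.map (fun c => 1 - c) := by simp
        rw [this]
        have hlen : pre.length = (pre.map (fun c => (1:Int) - c)).length := by simp
        rw [hlen]
        simp [hw]
    have hqbin : ∀ x ∈ q, x = 0 ∨ x = 1 := by
      rcases hq with ⟨_, hqe⟩ | ⟨_, hqe⟩ <;> subst hqe
      · exact hb
      · intro x hx
        simp only [List.mem_map] at hx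
        obtain ⟨y, hy, hxy⟩ := hx
        rcases hb y hy with h | h <;> [right; left] <;> omega
    show fpGo (rs.length + 1) pre.length q freed = _
    rw [show (rs.length + 1) = Nat.succ rs.length from rfl]
    simp only [fpGo, hget]
    have hcond : ((if want = 1 then cell else 1 - cell) = 1) ↔ (cell = want) := by
      rcases hq with ⟨hw, _⟩ | ⟨hw, _⟩ <;> subst hw
      · simp
      · rcases hcell with h | h <;> subst h <;> norm_num
    by_cases hcw : cell = want
    · rw [if_pos (hcond.mpr hcw)]
      simp only [fpAltGo, if_pos hcw]
      have hsw := switch_locks_binary q hqbin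
      have hpl : pre.length + 1 = (pre ++ [cell]).length := by simp
      rw [hsw, hpl]
      apply ih (pre ++ [cell]) (freed + 1) (1 - want) _ hb'
      rcases hq with ⟨hw, hqe⟩ | ⟨hw, hqe⟩ <;> subst hqe <;> subst hw
      · right; constructor; · norm_num
        simp
      · left; constructor; · norm_num
        simp only [List.map_map]
        simp
    · rw [if_neg (fun h => hcw (hcond.mp h))]
      simp only [fpAltGo, if_neg hcw]
      have hpl : pre.length + 1 = (pre ++ [cell]).length := by simp
      rw [hpl]
      apply ih (pre ++ [cell]) freed want _ hb'
      rcases hq with ⟨hw, hqe⟩ | ⟨hw, hqe⟩ <;> subst hqe <;> [left; right] <;> simp [hw]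

lemma main_no1_A (rest : List Int) : ∀ (pre : List Int), (1 : Int) ∉ rest.dropLast →
    fpGo rest.length pre.length (pre ++ rest) 0 = (if rest.getLast? = some 1 then 1 else 0) := by
  induction rest with
  | nil => intro pre _; simp [fpGo]
  | cons cell rs ih =>
    intro pre h1
    show fpGo (rs.length + 1) pre.length (pre ++ cell :: rs) 0 = _
    rw [show (rs.length + 1) = Nat.succ rs.length from rfl]
    have hget : PySem.List.pyGet? (pre ++ cell :: rs) (Int.ofNat pre.length) = some cell := by
      simp
    simp only [fpGo, hget]
    cases rs with
    | nil =>
      by_cases hc : cell = 1 <;> simp [hc, fpGo]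
    | cons r rt =>
      have hne : r :: rt ≠ [] := by simp
      rw [List.dropLast_cons_of_ne_nil hne] at h1
      have hc : cell ≠ 1 := fun h => h1 (by simp [h])
      have h1' : (1 : Int) ∉ (r :: rt).dropLast := fun h => h1 (by simp [h])
      rw [if_neg hc]
      have hpl : pre.length + 1 = (pre ++ [cell]).length := by simp
      have hl : pre ++ cell :: r :: rt = (pre ++ [cell]) ++ r :: rt := by simp
      rw [hpl, hl, ih (pre ++ [cell]) h1', List.getLast?_cons_cons]

lemma main_no1_B (rest : List Int) : (1 : Int) ∉ rest.dropLast →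
    fpAltGo rest 0 1 = (if rest.getLast? = some 1 then 1 else 0) := by
  induction rest with
  | nil => intro _; simp [fpAltGo]
  | cons cell rs ih =>
    intro h1
    cases rs with
    | nil => by_cases hc : cell = (1 : Int) <;> simp [fpAltGo, hc]
    | cons r rt =>
      have hne : r :: rt ≠ [] := by simp
      rw [List.dropLast_cons_of_ne_nil hne] at h1
      have hc : cell ≠ 1 := fun h => h1 (by simp [h])
      have h1' : (1 : Int) ∉ (r :: rt).dropLast := fun h => h1 (by simp [h])
      have step : fpAltGo (cell :: r :: rt) 0 1 = fpAltGo (r :: rt) 0 1 := by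
        rw [fpAltGo, if_neg hc]
      rw [step, ih h1', List.getLast?_cons_cons]

-- ===== VERDICT (by name: the statement is the Claim_ definition above) =====
theorem freed_prisoners_spec : Claim_equal_freed_prisoners := by
  intro prison _ hpre
  obtain ⟨hne, hc⟩ := hpre
  obtain ⟨x, t, rfl⟩ : ∃ x t, prison = x :: t := by
    cases prison with
    | nil => exact absurd rfl hne
    | cons x t => exact ⟨x, t, rfl⟩
  unfold Spec_freed_prisoners freed_prisoners freed_prisoners_alt
  rw [PySem.List.pyGet?_zero_cons]
  by_cases hx : x = 0
  · simp [hx]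
  · simp only [if_neg hx]
    rcases hc with h | h | h
    · simp at h; exact absurd h hx
    · exact main_binary (x :: t) [] 0 1 (x :: t) (by simpa using h) (Or.inl ⟨rfl, rfl⟩)
    · have ha := main_no1_A (x :: t) [] h
      simp only [List.nil_append, List.length_nil] at ha
      rw [ha, main_no1_B (x :: t) h]
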